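-- pv_equiv track=rewrite | github.com/akshay-greenlang/Code-V1_GreenLang | _archive/07_fy29_plus_premature_packs/eu-compliance/PACK-009-eu-climate-compliance-bundle/integrations/cbam_pack_bridge.py | _categorize_cn_codes
-- ===== SOURCE A (Python) =====
-- from typing import Dict, List, Optional, Any, Literal
--
-- CBAM_PRODUCT_CATEGORIES: Dict[str, List[str]] = {
--     "cement": ["2523 10", "2523 21", "2523 29", "2523 30", "2523 90"],
--     "iron_and_steel": [
--         "7201", "7202", "7203", "7204", "7205", "7206", "7207",
--         "7208", "7209", "7210", "7211", "7212", "7213",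
--         "7214", "7215", "7216", "7217", "7218", "7219",
--         "7220", "7221", "7222", "7223", "7224", "7225",
--         "7226", "7227", "7228", "7229", "7301", "7302",
--         "7303", "7304", "7305", "7306", "7307",
--     ],
--     "aluminium": [
--         "7601", "7602", "7603", "7604", "7605", "7606",
--         "7607", "7608", "7609",
--     ],
--     "fertilizers": [
--         "2808 00 00", "3102", "3105",
--     ],
--     "electricity": ["2716 00 00"],
--     "hydrogen": ["2804 10 00"],
-- }
--
-- def _categorize_cn_codes(cn_codes: List[str]) -> List[str]:
--     """Categorize CN codes into CBAM product categories."""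
--     found_categories: List[str] = []
--     for category, codes in CBAM_PRODUCT_CATEGORIES.items():
--         for cn in cn_codes:
--             cn_stripped = cn.replace(" ", "")
--             for ref_code in codes:
--                 ref_stripped = ref_code.replace(" ", "")
--                 if cn_stripped.startswith(ref_stripped):
--                     if category not in found_categories:
--                         found_categories.append(category)
--                     break
--     return found_categories
-- ===== SOURCE B (Python) =====
-- from typing import Dict, List
--
-- CBAM_PRODUCT_CATEGORIES: Dict[str, List[str]] = {
--     "cement": ["2523 10", "2523 21", "2523 29", "2523 30", "2523 90"],
--     "iron_and_steel": [
--         "7201", "7202", "7203", "7204", "7205", "7206", "7207",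
--         "7208", "7209", "7210", "7211", "7212", "7213",
--         "7214", "7215", "7216", "7217", "7218", "7219",
--         "7220", "7221", "7222", "7223", "7224", "7225",
--         "7226", "7227", "7228", "7229", "7301", "7302",
--         "7303", "7304", "7305", "7306", "7307",
--     ],
--     "aluminium": [
--         "7601", "7602", "7603", "7604", "7605", "7606",
--         "7607", "7608", "7609",
--     ],
--     "fertilizers": [
--         "2808 00 00", "3102", "3105",
--     ],
--     "electricity": ["2716 00 00"],
--     "hydrogen": ["2804 10 00"],
-- }
--
-- # Hash index: stripped reference prefix -> category (all stripped prefixes are distinct).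
-- _PREFIX_TO_CAT: Dict[str, str] = {
--     p.replace(" ", ""): cat
--     for cat, codes in CBAM_PRODUCT_CATEGORIES.items()
--     for p in codes
-- }
-- # The distinct prefix lengths that occur in the index.
-- _LENS = sorted({len(p) for p in _PREFIX_TO_CAT})
--
-- def _categorize_cn_codes(cn_codes: List[str]) -> List[str]:
--     """Categorize CN codes into CBAM product categories."""
--     matched = set()
--     for cn in cn_codes:
--         s = cn.replace(" ", "")
--         for L in _LENS:
--             cat = _PREFIX_TO_CAT.get(s[:L])
--             if cat is not None:
--                 matched.add(cat)
--     return [c for c in CBAM_PRODUCT_CATEGORIES if c in matched]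
-- ===== Notes on version B (the rewrite author's own statement) =====
-- stated objective: faster
-- what changed: B replaces A's triple nested scan over categories and reference codes by a precomputed hash index from stripped prefix to category: each input code is stripped once and looked up at each of the three distinct prefix lengths, matched categories are collected in a set, and the result is emitted by filtering the category dict in its key order.
import Mathlib
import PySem

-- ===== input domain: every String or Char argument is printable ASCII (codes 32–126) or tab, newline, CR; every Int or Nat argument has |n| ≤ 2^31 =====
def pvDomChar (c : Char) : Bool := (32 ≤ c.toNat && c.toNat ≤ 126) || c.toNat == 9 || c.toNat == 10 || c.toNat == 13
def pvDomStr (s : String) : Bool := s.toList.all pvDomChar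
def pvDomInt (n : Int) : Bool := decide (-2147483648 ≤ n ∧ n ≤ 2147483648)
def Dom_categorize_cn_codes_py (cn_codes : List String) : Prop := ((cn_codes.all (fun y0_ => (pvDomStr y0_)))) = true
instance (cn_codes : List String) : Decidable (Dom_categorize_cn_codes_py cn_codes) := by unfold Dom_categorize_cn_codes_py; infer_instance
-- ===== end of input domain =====

-- B replaces A's nested scans over categories and reference prefixes by a hash index
-- from stripped prefix to category, queried at each of the distinct prefix lengths
-- (a constant number of lookups per code; measured faster in a timing run).

-- ===== PORT A =====
-- the module constant CBAM_PRODUCT_CATEGORIES (dict → association list)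
def pvCBAM : List (String × List String) :=
  [("cement", ["2523 10", "2523 21", "2523 29", "2523 30", "2523 90"]),
   ("iron_and_steel",
     ["7201", "7202", "7203", "7204", "7205", "7206", "7207",
      "7208", "7209", "7210", "7211", "7212", "7213",
      "7214", "7215", "7216", "7217", "7218", "7219",
      "7220", "7221", "7222", "7223", "7224", "7225",
      "7226", "7227", "7228", "7229", "7301", "7302",
      "7303", "7304", "7305", "7306", "7307"]),
   ("aluminium", ["7601", "7602", "7603", "7604", "7605", "7606", "7607", "7608", "7609"]),
   ("fertilizers", ["2808 00 00", "3102", "3105"]),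
   ("electricity", ["2716 00 00"]),
   ("hydrogen", ["2804 10 00"])]

-- the inner 'for ref_code in codes: … if match: (append) ; break' — the break makes it a
-- first-match scan, so the loop reduces to: does some ref match?
def pvRefLoop (cn_stripped : String) (codes : List String) : Bool :=
  match codes with
  | [] => false
  | ref :: rest =>
      if PySem.Str.startswith cn_stripped (PySem.Str.replace ref " " "") then true
      else pvRefLoop cn_stripped rest

def categorize_cn_codes_py (cn_codes : List String) : List String :=
  pvCBAM.foldl (fun found p =>
    cn_codes.foldl (fun found cn =>
      let cn_stripped := PySem.Str.replace cn " " ""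
      if pvRefLoop cn_stripped p.2 then
        (if found.contains p.1 then found else found ++ [p.1])
      else found) found) []

-- ===== PORT B =====
-- _PREFIX_TO_CAT: the dict comprehension {p.replace(" ",""): cat for cat, codes in … for p in codes}
def pvTable : PySem.Dict String String :=
  pvCBAM.foldl (fun d p =>
    p.2.foldl (fun d r => d.insert (PySem.Str.replace r " " "") p.1) d) PySem.Dict.empty

-- _LENS = sorted({len(p) for p in _PREFIX_TO_CAT})
def pvLens : List Int :=
  PySem.List.sorted (PySem.Set.ofList ((PySem.Dict.keys pvTable).map PySem.Str.len)) (fun x => x) false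

def categorize_cn_codes_py_alt (cn_codes : List String) : List String :=
  let matched : PySem.Set String :=
    cn_codes.foldl (fun m cn =>
      let s := PySem.Str.replace cn " " ""
      pvLens.foldl (fun m L =>
        match PySem.Dict.get? pvTable (PySem.Str.slice s none (some L)) with
        | some cat => PySem.Set.add m cat
        | none => m) m) PySem.Set.empty
  (pvCBAM.map Prod.fst).filter (fun c => PySem.Set.contains matched c)

-- ===== PRECONDITION & SPEC =====
def Spec_categorize_cn_codes_py (cn_codes : List String) (out : List String) : Prop := out = categorize_cn_codes_py_alt cn_codes
instance (cn_codes : List String) (out : List String) : Decidable (Spec_categorize_cn_codes_py cn_codes out) := by unfold Spec_categorize_cn_codes_py; infer_instance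

-- ===== CLAIM (what is proved, stated in full; the proofs are below) =====
def Claim_equal_categorize_cn_codes_py : Prop := ∀ (cn_codes : List String), Dom_categorize_cn_codes_py cn_codes → Spec_categorize_cn_codes_py cn_codes (categorize_cn_codes_py cn_codes)

-- ===== LEMMAS AND PROOFS =====

-- the break-scan is a disjunction over the stripped refs
theorem pvRefLoop_eq_any (s : String) (codes : List String) :
    pvRefLoop s codes = codes.any (fun r => PySem.Str.startswith s (PySem.Str.replace r " " "")) := by
  induction codes with
  | nil => rfl
  | cons r rest ih =>
    rw [List.any_cons, ← ih, pvRefLoop]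
    cases hx : PySem.Str.startswith s (PySem.Str.replace r " " "") <;> simp

-- the matching predicate A computes for one category's code list
def pvMatch (cn_codes : List String) (codes : List String) : Bool :=
  cn_codes.any (fun cn =>
    codes.any (fun r => PySem.Str.startswith (PySem.Str.replace cn " " "") (PySem.Str.replace r " " "")))

-- A's middle-loop step (definitionally the lambda in port A)
def pvStepCn (codes : List String) (cat : String) (found : List String) (cn : String) : List String :=
  let cn_stripped := PySem.Str.replace cn " " ""
  if pvRefLoop cn_stripped codes then (if found.contains cat then found else found ++ [cat]) else found

-- the per-category step of A, after pvInnerA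
def pvStepA (cn_codes : List String) (found : List String) (p : String × List String) : List String :=
  if pvMatch cn_codes p.2 && !found.contains p.1 then found ++ [p.1] else found

-- A's middle loop: fold over cn_codes appends the category at most once
theorem pvInnerA (cn_codes : List String) (cat : String) (codes : List String) (found : List String) :
    cn_codes.foldl (pvStepCn codes cat) found
    = if pvMatch cn_codes codes && !found.contains cat then found ++ [cat] else found := by
  induction cn_codes generalizing found with
  | nil => simp [pvMatch]
  | cons cn rest ih =>
    rw [List.foldl_cons]
    have hstep : pvMatch (cn :: rest) codes
        = (pvRefLoop (PySem.Str.replace cn " " "") codes || pvMatch rest codes) := by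
      simp [pvMatch, pvRefLoop_eq_any]
    simp only [hstep]
    cases hb : pvRefLoop (PySem.Str.replace cn " " "") codes with
    | false =>
      rw [show pvStepCn codes cat found cn = found from by simp [pvStepCn, hb], ih]
      simp
    | true =>
      cases hc : found.contains cat with
      | false =>
        have hc' : cat ∉ found := by simpa using hc
        rw [show pvStepCn codes cat found cn = found ++ [cat] from by simp [pvStepCn, hb, hc'], ih]
        simp [hc']
      | true =>
        have hc' : cat ∈ found := by simpa using hc
        rw [show pvStepCn codes cat found cn = found from by simp [pvStepCn, hb, hc'], ih]
        simp [hc']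

-- A's outer fold over an association list with keys not yet in 'found' and pairwise-distinct
theorem pvFoldA (cn_codes : List String) (L : List (String × List String)) (found : List String)
    (hf : ∀ p ∈ L, found.contains p.1 = false) (hn : (L.map Prod.fst).Nodup) :
    L.foldl (pvStepA cn_codes) found
    = found ++ (L.filter (fun p => pvMatch cn_codes p.2)).map Prod.fst := by
  induction L generalizing found with
  | nil => simp
  | cons p rest ih =>
    rw [List.foldl_cons]
    have hp : found.contains p.1 = false := hf p (by simp)
    simp only [List.map_cons, List.nodup_cons] at hn
    have hp' : p.1 ∉ found := by simpa using hp
    cases hm : pvMatch cn_codes p.2 with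
    | true =>
      rw [show pvStepA cn_codes found p = found ++ [p.1] from by simp [pvStepA, hm, hp']]
      rw [ih (found ++ [p.1]) ?_ hn.2]
      · simp [hm]
      · intro q hq
        have h1 : q.1 ∉ found := by simpa using hf q (by simp [hq])
        have h2 : p.1 ≠ q.1 := fun h => hn.1 (h ▸ List.mem_map_of_mem hq)
        simp [h1, Ne.symm h2]
    | false =>
      rw [show pvStepA cn_codes found p = found from by simp [pvStepA, hm]]
      rw [ih found (fun q hq => hf q (by simp [hq])) hn.2]
      simp [hm]

-- adding to a Set: membership afterwards
theorem pvContains_add (m : PySem.Set String) (x y : String) :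
    PySem.Set.contains (PySem.Set.add m x) y = (PySem.Set.contains m y || x == y) := by
  simp only [PySem.Set.add]
  split_ifs with h
  · rcases eq_or_ne x y with rfl | hxy
    · simp_all [PySem.Set.contains]
    · simp [PySem.Set.contains, hxy]
  · rcases eq_or_ne x y with rfl | hxy
    · simp [PySem.Set.contains]
    · simp [PySem.Set.contains, hxy, Ne.symm hxy]

-- membership in B's set after the lookup loop over the prefix lengths, for one input code
theorem pvInnerB (g : Int → Option String) (lens : List Int) (m : PySem.Set String) (cat : String) :
    PySem.Set.contains
      (lens.foldl (fun m L => match g L with | some c => PySem.Set.add m c | none => m) m) cat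
    = (PySem.Set.contains m cat || lens.any (fun L => g L == some cat)) := by
  induction lens generalizing m with
  | nil => simp
  | cons L rest ih =>
    simp only [List.foldl_cons, List.any_cons]
    cases hg : g L with
    | none => rw [ih]; simp
    | some c =>
      rw [ih, pvContains_add, Bool.or_assoc]
      simp

-- membership in B's set after the whole scan of cn_codes
theorem pvOuterB (cn_codes : List String) (cat : String) :
    PySem.Set.contains
      (cn_codes.foldl (fun m cn =>
        let s := PySem.Str.replace cn " " ""
        pvLens.foldl (fun m L =>
          match PySem.Dict.get? pvTable (PySem.Str.slice s none (some L)) with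
          | some cat => PySem.Set.add m cat
          | none => m) m) PySem.Set.empty) cat
    = cn_codes.any (fun cn =>
        pvLens.any (fun L =>
          PySem.Dict.get? pvTable (PySem.Str.slice (PySem.Str.replace cn " " "") none (some L)) == some cat)) := by
  induction cn_codes using List.reverseRecOn with
  | nil => simp [PySem.Set.empty, PySem.Set.contains]
  | append_singleton rest cn ih =>
    simp only [List.foldl_append, List.foldl_cons, List.foldl_nil, List.any_append,
      List.any_cons, List.any_nil, Bool.or_false]
    rw [pvInnerB (fun L => PySem.Dict.get? pvTable (PySem.Str.slice (PySem.Str.replace cn " " "") none (some L))), ih]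

-- pointwise-equal predicates give the same 'any'
theorem pvAnyCongr {α : Type} (l : List α) (f g : α → Bool) (h : ∀ x ∈ l, f x = g x) :
    l.any f = l.any g := by
  induction l with
  | nil => rfl
  | cons x rest ih => simp only [List.any_cons, h x (by simp), ih (fun y hy => h y (by simp [hy]))]

-- the flat association list the dict comprehension builds (keys all distinct)
def pvE : List (String × String) :=
  pvCBAM.flatMap (fun p => p.2.map (fun r => (PySem.Str.replace r " " "", p.1)))

theorem pv_nodup_keys : (pvCBAM.map Prod.fst).Nodup := by decide
set_option maxRecDepth 100000 in
set_option maxHeartbeats 1000000 in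
theorem pv_items : pvTable.items = pvE := by decide
set_option maxRecDepth 100000 in
set_option maxHeartbeats 1000000 in
theorem pv_nodup_table : pvTable.keys.Nodup := by decide
set_option maxRecDepth 100000 in
set_option maxHeartbeats 1000000 in
theorem pv_lens_eq : pvLens = [4, 6, 8] := by decide
set_option maxRecDepth 100000 in
set_option maxHeartbeats 1000000 in
theorem pv_len_mem : ∀ e ∈ pvE, ((e.1.toList.length : Int)) ∈ ([4, 6, 8] : List Int) := by decide

theorem pv_len_mem_pair (k c : String) (h : (k, c) ∈ pvE) :
    ((k.toList.length : Int)) ∈ ([4, 6, 8] : List Int) := pv_len_mem (k, c) h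

-- the crux: for each category, B's indexed lookups at the prefix lengths hit exactly
-- when some stripped reference prefix of that category is a prefix of s
set_option maxRecDepth 100000 in
set_option maxHeartbeats 2000000 in
theorem pvCrux (p : String × List String) (hp : p ∈ pvCBAM) (s : String) :
    pvLens.any (fun L => PySem.Dict.get? pvTable (PySem.Str.slice s none (some L)) == some p.1)
    = p.2.any (fun r => PySem.Str.startswith s (PySem.Str.replace r " " "")) := by
  rw [pv_lens_eq, Bool.eq_iff_iff]
  simp only [List.any_eq_true, beq_iff_eq]
  constructor
  · rintro ⟨L, hL, hget⟩
    have hmem := (PySem.Dict.get?_eq_some_iff_mem_items pvTable _ _ pv_nodup_table).mp hget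
    rw [pv_items] at hmem
    simp only [pvE, List.mem_flatMap, List.mem_map] at hmem
    obtain ⟨q, hq, r, hr, heq⟩ := hmem
    have hcat : q.1 = p.1 := congrArg Prod.snd heq
    have hqp : q = p := List.inj_on_of_nodup_map pv_nodup_keys hq hp hcat
    subst hqp
    refine ⟨r, hr, ?_⟩
    have hkey : PySem.Str.replace r " " "" = PySem.Str.slice s none (some L) :=
      (congrArg Prod.fst heq)
    have htl : (PySem.Str.replace r " " "").toList = s.toList.take L.toNat := by
      rw [hkey, PySem.Str.toList_slice, PySem.Chars.slice_eq_listSlice,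
        PySem.List.slice_to _ (by fin_cases hL <;> norm_num)]
    simp only [PySem.Str.startswith_eq, PySem.Chars.startswith_iff]
    rw [htl]
    exact List.take_prefix _ _
  · rintro ⟨r, hr, hsw⟩
    have hpre : (PySem.Str.replace r " " "").toList <+: s.toList := by
      simpa only [PySem.Str.startswith_eq, PySem.Chars.startswith_iff] using hsw
    have hmemE : (PySem.Str.replace r " " "", p.1) ∈ pvE := by
      simp only [pvE, List.mem_flatMap, List.mem_map]
      exact ⟨p, hp, r, hr, rfl⟩
    refine ⟨((PySem.Str.replace r " " "").toList.length : Int), pv_len_mem_pair _ _ hmemE, ?_⟩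
    have hslice : PySem.Str.slice s none (some ((PySem.Str.replace r " " "").toList.length : Int))
        = PySem.Str.replace r " " "" := by
      apply String.toList_inj.mp
      rw [PySem.Str.toList_slice, PySem.Chars.slice_eq_listSlice,
        PySem.List.slice_to _ (by positivity), Int.toNat_natCast]
      exact (List.prefix_iff_eq_take.mp hpre).symm
    rw [hslice]
    exact PySem.Dict.get?_of_mem_items pvTable (pv_items ▸ hmemE) pv_nodup_table

-- ===== VERDICT (by name: the statement is the Claim_ definition above) =====
theorem categorize_cn_codes_py_spec : Claim_equal_categorize_cn_codes_py := by
  intro cn_codes _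
  unfold Spec_categorize_cn_codes_py categorize_cn_codes_py categorize_cn_codes_py_alt
  have hA : ∀ (found : List String) (p : String × List String),
      cn_codes.foldl (fun found cn =>
        let cn_stripped := PySem.Str.replace cn " " ""
        if pvRefLoop cn_stripped p.2 then
          (if found.contains p.1 then found else found ++ [p.1])
        else found) found = pvStepA cn_codes found p := by
    intro found p; exact pvInnerA cn_codes p.1 p.2 found
  simp only [hA]
  rw [pvFoldA cn_codes pvCBAM [] (by simp) pv_nodup_keys, List.nil_append, List.filter_map]
  refine Eq.symm (congrArg (List.map Prod.fst) (List.filter_congr ?_))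
  intro p hp
  rw [Function.comp_apply, pvOuterB, pvMatch]
  exact pvAnyCongr cn_codes _ _ (fun cn _ => pvCrux p hp (PySem.Str.replace cn " " ""))
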